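-- pv_equiv track=rewrite | github.com/ErinZhang1998/sketch_collection | read_datasets.py | absolutedata2stroke3
-- ===== SOURCE A (Python) =====
-- def absolutedata2stroke3(data, label_selected=[]):
--     ''' ** '''
--     prev_x, prev_y = 25,25
--     result = []
--     for data_idx,(x,y,p,l) in enumerate(data):
--
--         add = False
--         if len(label_selected) == 0 or l in label_selected:
--             result.append([x-prev_x, y-prev_y,p])
--             prev_x = x
--             prev_y = y
--             add = True
--
--         if len(label_selected) > 0 and add and len(result) > 1:
--             if data[data_idx-1][-1] != l or data[data_idx-1][-2] == 1:
--                 # ddx,ddy,_,_,_ = result[-2]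
--                 result[-2][2] = 1
--
--     return result
-- ===== SOURCE B (Python) =====
-- def absolutedata2stroke3(data, label_selected=[]):
--     # Two-phase rewrite: phase 1 filters rows and emits (index, label, dx, dy, p)
--     # entries; phase 2 streams the entries once, holding the previous stroke
--     # pending so its pen bit can be lifted when the next kept entry shows a
--     # label break (or a pen-up on the raw predecessor row).
--     prev_x, prev_y = 25, 25
--     entries = []
--     for i, (x, y, p, l) in enumerate(data):
--         if not label_selected or l in label_selected:
--             entries.append((i, l, x - prev_x, y - prev_y, p))
--             prev_x, prev_y = x, y
--     result = []
--     pending = None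
--     for (idx, lbl, dx, dy, p) in entries:
--         if pending is not None:
--             pdx, pdy, pp = pending
--             lift = bool(label_selected) and (data[idx - 1][-1] != lbl or data[idx - 1][-2] == 1)
--             result.append([pdx, pdy, 1 if lift else pp])
--         pending = (dx, dy, p)
--     if pending is not None:
--         result.append([pending[0], pending[1], pending[2]])
--     return result
-- ===== Notes on version B (the rewrite author's own statement) =====
-- stated objective: alternative
-- what changed: Replaces A's single online loop that mutates the second-to-last emitted row in place with a two-phase pipeline: one pass that filters rows and records (index, label, delta) entries, then a streaming pass with a pending stroke that decides each pen bit from the next entry, building the output without mutation.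
import Mathlib
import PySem

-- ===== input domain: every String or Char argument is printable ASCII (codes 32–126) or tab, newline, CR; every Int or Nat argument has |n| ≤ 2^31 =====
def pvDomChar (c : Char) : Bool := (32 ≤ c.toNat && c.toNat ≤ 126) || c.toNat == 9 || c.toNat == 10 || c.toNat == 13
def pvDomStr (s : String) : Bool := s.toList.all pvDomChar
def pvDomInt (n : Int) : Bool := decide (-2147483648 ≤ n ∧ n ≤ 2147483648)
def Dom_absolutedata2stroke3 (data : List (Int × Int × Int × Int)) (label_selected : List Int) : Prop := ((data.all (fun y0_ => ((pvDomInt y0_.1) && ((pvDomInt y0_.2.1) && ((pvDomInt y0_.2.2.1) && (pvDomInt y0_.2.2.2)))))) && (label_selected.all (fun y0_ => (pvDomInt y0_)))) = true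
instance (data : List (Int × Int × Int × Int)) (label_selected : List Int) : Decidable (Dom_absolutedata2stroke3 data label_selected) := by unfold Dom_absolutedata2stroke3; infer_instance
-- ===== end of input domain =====

-- ===== PORT A =====
-- B changes the decomposition (two-phase pipeline with a pending stroke instead of
-- in-place mutation of the emitted list); same values, objective: alternative.
-- hand port of Python's `result[-2][2] = 1` (exact whenever result.length ≥ 2, the
-- only case in which A executes it):
def pvSetPen2 (res : List (List Int)) : List (List Int) :=
  res.set (res.length - 2) ((res.getD (res.length - 2) []).set 2 1)

-- A's loop body (`add` is true exactly when the first branch fired, so the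
-- second `if` of A's body is nested into that branch)
def pvStepA (data : List (Int × Int × Int × Int)) (ls : List Int)
    (st : Int × Int × List (List Int)) (e : Int × (Int × Int × Int × Int)) :
    Int × Int × List (List Int) :=
  let px := st.1; let py := st.2.1; let res := st.2.2
  let i := e.1; let x := e.2.1; let y := e.2.2.1; let p := e.2.2.2.1; let l := e.2.2.2.2
  if ls.length == 0 || ls.contains l then
    let res1 := res ++ [[x - px, y - py, p]]
    let res2 :=
      if decide (0 < ls.length) && decide (1 < res1.length) then
        match PySem.List.pyGet? data (i - 1) with
        | some prev => if prev.2.2.2 != l || prev.2.2.1 == 1 then pvSetPen2 res1 else res1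
        | none => res1   -- unreachable: res1.length > 1 forces i ≥ 1
      else res1
    (x, y, res2)
  else st

def absolutedata2stroke3 (data : List (Int × Int × Int × Int)) (label_selected : List Int) : List (List Int) :=
  ((PySem.List.enumerate data 0).foldl (pvStepA data label_selected) (25, 25, [])).2.2

-- ===== PORT B =====
-- phase 1 of B: filter + deltas, recording (index, label, dx, dy, p)
def pvStepB1 (ls : List Int)
    (st : Int × Int × List (Int × Int × Int × Int × Int)) (e : Int × (Int × Int × Int × Int)) :
    Int × Int × List (Int × Int × Int × Int × Int) :=
  let px := st.1; let py := st.2.1; let es := st.2.2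
  let i := e.1; let x := e.2.1; let y := e.2.2.1; let p := e.2.2.2.1; let l := e.2.2.2.2
  if ls.length == 0 || ls.contains l then
    (x, y, es ++ [(i, l, x - px, y - py, p)])
  else st

-- phase 2 of B: stream the entries, resolving the pending stroke's pen bit
-- from the current entry
def pvStepB2 (data : List (Int × Int × Int × Int)) (ls : List Int)
    (st : Option (Int × Int × Int) × List (List Int)) (e : Int × Int × Int × Int × Int) :
    Option (Int × Int × Int) × List (List Int) :=
  let idx := e.1; let lbl := e.2.1; let dx := e.2.2.1; let dy := e.2.2.2.1; let p := e.2.2.2.2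
  let res :=
    match st.1 with
    | some pd =>
        let lift := decide (0 < ls.length) &&
          (match PySem.List.pyGet? data (idx - 1) with
           | some prev => prev.2.2.2 != lbl || prev.2.2.1 == 1
           | none => false)   -- unreachable: a pending stroke forces idx ≥ 1
        st.2 ++ [[pd.1, pd.2.1, if lift then 1 else pd.2.2]]
    | none => st.2
  (some (dx, dy, p), res)

def absolutedata2stroke3_alt (data : List (Int × Int × Int × Int)) (label_selected : List Int) : List (List Int) :=
  let entries := ((PySem.List.enumerate data 0).foldl (pvStepB1 label_selected) (25, 25, [])).2.2
  let fin := entries.foldl (pvStepB2 data label_selected) (none, [])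
  match fin.1 with
  | some pd => fin.2 ++ [[pd.1, pd.2.1, pd.2.2]]
  | none => fin.2

-- ===== PRECONDITION & SPEC =====
def Spec_absolutedata2stroke3 (data : List (Int × Int × Int × Int)) (label_selected : List Int) (out : List (List Int)) : Prop := out = absolutedata2stroke3_alt data label_selected
instance (data : List (Int × Int × Int × Int)) (label_selected : List Int) (out : List (List Int)) : Decidable (Spec_absolutedata2stroke3 data label_selected out) := by unfold Spec_absolutedata2stroke3; infer_instance

-- ===== CLAIM (what is proved, stated in full; the proofs are below) =====
def Claim_equal_absolutedata2stroke3 : Prop := ∀ (data : List (Int × Int × Int × Int)) (label_selected : List Int), Dom_absolutedata2stroke3 data label_selected → Spec_absolutedata2stroke3 data label_selected (absolutedata2stroke3 data label_selected)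

-- ===== LEMMAS AND PROOFS =====

-- the "lift the previous pen bit" test both programs apply at a kept row (i, l)
def pvCond (data : List (Int × Int × Int × Int)) (ls : List Int) (i l : Int) : Bool :=
  decide (0 < ls.length) &&
    (match PySem.List.pyGet? data (i - 1) with
     | some prev => prev.2.2.2 != l || prev.2.2.1 == 1
     | none => false)

-- the kept entries (index, label, dx, dy, p), as phase 1 of B produces them
def pvEnts (ls : List Int) (k px py : Int) :
    List (Int × Int × Int × Int) → List (Int × Int × Int × Int × Int)
  | [] => []
  | (x, y, p, l) :: t =>
      if ls.length == 0 || ls.contains l then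
        (k, l, x - px, y - py, p) :: pvEnts ls (k + 1) x y t
      else pvEnts ls (k + 1) px py t

theorem pvEnts_cons (ls : List Int) (k px py x y p l : Int) (t : List (Int × Int × Int × Int)) :
    pvEnts ls k px py ((x, y, p, l) :: t) =
      if ls.length == 0 || ls.contains l then
        (k, l, x - px, y - py, p) :: pvEnts ls (k + 1) x y t
      else pvEnts ls (k + 1) px py t := rfl

-- does the FIRST entry of es trigger the lift test?
def pvHeadCond (data : List (Int × Int × Int × Int)) (ls : List Int)
    (es : List (Int × Int × Int × Int × Int)) : Bool :=
  match es with
  | (i2, l2, _, _, _) :: _ => pvCond data ls i2 l2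
  | [] => false

theorem pvHeadCond_cons (data : List (Int × Int × Int × Int)) (ls : List Int)
    (i2 l2 a b c : Int) (es : List (Int × Int × Int × Int × Int)) :
    pvHeadCond data ls ((i2, l2, a, b, c) :: es) = pvCond data ls i2 l2 := rfl

-- the common output: each stroke's pen bit is lifted when the NEXT entry triggers pvCond
def pvOut (data : List (Int × Int × Int × Int)) (ls : List Int) :
    List (Int × Int × Int × Int × Int) → List (List Int)
  | [] => []
  | (_, _, dx, dy, p) :: es =>
      [dx, dy, if pvHeadCond data ls es then 1 else p] :: pvOut data ls es

theorem pvOut_cons (data : List (Int × Int × Int × Int)) (ls : List Int)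
    (i l dx dy p : Int) (es : List (Int × Int × Int × Int × Int)) :
    pvOut data ls ((i, l, dx, dy, p) :: es)
      = [dx, dy, if pvHeadCond data ls es then 1 else p] :: pvOut data ls es := rfl

-- flag the pen bit of the last emitted row (the pure form of A's mutation)
def pvFlagLast : List (List Int) → List (List Int)
  | [] => []
  | [r] => [r.set 2 1]
  | r :: s :: t => r :: pvFlagLast (s :: t)

theorem pvFlagLast_append : ∀ (res : List (List Int)) (r : List Int),
    pvFlagLast (res ++ [r]) = res ++ [r.set 2 1]
  | [], r => rfl
  | a :: res, r => by
    cases res with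
    | nil => rfl
    | cons b res' =>
      show a :: pvFlagLast ((b :: res') ++ [r]) = _
      rw [pvFlagLast_append (b :: res') r]
      rfl

theorem pvSetPen2_append (res : List (List Int)) (r : List Int) (h : res ≠ []) :
    pvSetPen2 (res ++ [r]) = pvFlagLast res ++ [r] := by
  induction res with
  | nil => exact absurd rfl h
  | cons a res ih =>
    cases res with
    | nil => rfl
    | cons b res' =>
      show pvSetPen2 (a :: ((b :: res') ++ [r])) = (a :: pvFlagLast (b :: res')) ++ [r]
      have ih' := ih (by simp)
      unfold pvSetPen2 at ih' ⊢
      simp only [List.length_cons, List.length_append, List.length_nil] at ih' ⊢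
      have h2 : res'.length + 1 + (0 + 1) + 1 - 2 = (res'.length + 1 + (0 + 1) - 2) + 1 := by omega
      rw [h2]
      simp only [List.set_cons_succ, List.getD_cons_succ]
      rw [ih']
      simp

-- A's one kept step, in pure form
theorem stepA_kept (data : List (Int × Int × Int × Int)) (ls : List Int)
    (px py k x y p l : Int) (res : List (List Int))
    (h : (ls.length == 0 || ls.contains l) = true) :
    pvStepA data ls (px, py, res) (k, (x, y, p, l)) =
      (x, y, (if pvCond data ls k l then pvFlagLast res else res) ++ [[x - px, y - py, p]]) := by
  unfold pvStepA pvCond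
  simp only [h, if_true]
  cases res with
  | nil =>
    have : (decide (0 < ls.length) && decide (1 < ([] ++ [[x - px, y - py, p]] : List (List Int)).length)) = false := by
      simp
    rw [this]
    cases hc : (decide (0 < ls.length) &&
        (match PySem.List.pyGet? data (k - 1) with
         | some prev => prev.2.2.2 != l || prev.2.2.1 == 1
         | none => false)) <;> simp [pvFlagLast]
  | cons a rs =>
    have hlen : decide (1 < ((a :: rs) ++ [[x - px, y - py, p]]).length) = true := by
      simp
    rw [hlen, Bool.and_true]
    cases hl : decide (0 < ls.length) with
    | false => simp
    | true =>
      simp only [Bool.true_and]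
      cases hg : PySem.List.pyGet? data (k - 1) with
      | none => simp
      | some prev =>
        have hsp := pvSetPen2_append (a :: rs) [x - px, y - py, p] (by simp)
        cases hc : (prev.2.2.2 != l || prev.2.2.1 == 1) with
        | false => simp only [hc]; simp
        | true =>
          simp only [hc]
          simp only [List.cons_append]
          simp
          exact hsp

theorem foldA_eq (data : List (Int × Int × Int × Int)) (ls : List Int)
    (t : List (Int × Int × Int × Int)) :
    ∀ (k px py : Int) (res : List (List Int)),
    ((PySem.List.enumerate t k).foldl (pvStepA data ls) (px, py, res)).2.2 =
      (if pvHeadCond data ls (pvEnts ls k px py t) then pvFlagLast res else res)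
        ++ pvOut data ls (pvEnts ls k px py t) := by
  induction t with
  | nil => intro k px py res; simp [PySem.List.enumerate_nil, pvEnts, pvHeadCond, pvOut]
  | cons hd t ih =>
    intro k px py res
    obtain ⟨x, y, p, l⟩ := hd
    rw [PySem.List.enumerate_cons, List.foldl_cons, pvEnts_cons]
    cases hcond : (ls.length == 0 || ls.contains l) with
    | true =>
      rw [if_pos rfl, stepA_kept data ls px py k x y p l res hcond, ih, pvOut_cons]
      generalize pvEnts ls (k + 1) x y t = es'
      cases es' with
      | nil => simp [pvHeadCond, pvOut]
      | cons e2 rest =>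
        obtain ⟨i2, l2, a1, a2, a3⟩ := e2
        simp only [pvHeadCond_cons]
        by_cases hc : pvCond data ls i2 l2 = true
        · simp only [hc]
          rw [pvFlagLast_append]
          simp [List.set]
        · simp only [Bool.not_eq_true] at hc
          simp [hc]
    | false =>
      have hA : pvStepA data ls (px, py, res) (k, (x, y, p, l)) = (px, py, res) := by
        unfold pvStepA; simp only [hcond]; rfl
      rw [hA, ih]
      simp

theorem foldB1_eq (ls : List Int) (t : List (Int × Int × Int × Int)) :
    ∀ (k px py : Int) (es : List (Int × Int × Int × Int × Int)),
    ((PySem.List.enumerate t k).foldl (pvStepB1 ls) (px, py, es)).2.2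
      = es ++ pvEnts ls k px py t := by
  induction t with
  | nil => intro k px py es; simp [PySem.List.enumerate_nil, pvEnts]
  | cons hd t ih =>
    intro k px py es
    obtain ⟨x, y, p, l⟩ := hd
    rw [PySem.List.enumerate_cons, List.foldl_cons, pvEnts_cons]
    cases hcond : (ls.length == 0 || ls.contains l) with
    | true =>
      have hB : pvStepB1 ls (px, py, es) (k, (x, y, p, l))
          = (x, y, es ++ [(k, l, x - px, y - py, p)]) := by
        unfold pvStepB1; simp only [hcond]; rfl
      rw [if_pos rfl, hB, ih]
      simp
    | false =>
      have hB : pvStepB1 ls (px, py, es) (k, (x, y, p, l)) = (px, py, es) := by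
        unfold pvStepB1; simp only [hcond]; rfl
      rw [if_neg (by simp), hB, ih]

theorem foldB2_eq (data : List (Int × Int × Int × Int)) (ls : List Int)
    (es : List (Int × Int × Int × Int × Int)) :
    ∀ (pending : Option (Int × Int × Int)) (res : List (List Int)),
    (match (es.foldl (pvStepB2 data ls) (pending, res)).1 with
     | some pd => (es.foldl (pvStepB2 data ls) (pending, res)).2 ++ [[pd.1, pd.2.1, pd.2.2]]
     | none => (es.foldl (pvStepB2 data ls) (pending, res)).2) =
    res ++ (match pending with
            | some pd => [[pd.1, pd.2.1, if pvHeadCond data ls es then 1 else pd.2.2]]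
            | none => []) ++ pvOut data ls es := by
  induction es with
  | nil =>
    intro pending res
    cases pending <;> simp [pvHeadCond, pvOut]
  | cons e es ih =>
    intro pending res
    obtain ⟨idx, lbl, dx, dy, p⟩ := e
    rw [List.foldl_cons]
    have hstep : pvStepB2 data ls (pending, res) (idx, lbl, dx, dy, p)
        = (some (dx, dy, p),
           res ++ (match pending with
                   | some pd => [[pd.1, pd.2.1,
                       if pvCond data ls idx lbl then 1 else pd.2.2]]
                   | none => [])) := by
      unfold pvStepB2 pvCond
      cases pending <;> simp
    rw [hstep, ih, pvOut_cons]
    cases pending <;> simp [pvHeadCond]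

theorem portA_eq_out (data : List (Int × Int × Int × Int)) (ls : List Int) :
    absolutedata2stroke3 data ls = pvOut data ls (pvEnts ls 0 25 25 data) := by
  unfold absolutedata2stroke3
  rw [foldA_eq data ls data 0 25 25 []]
  cases pvHeadCond data ls (pvEnts ls 0 25 25 data) <;> simp [pvFlagLast]

theorem portB_eq_out (data : List (Int × Int × Int × Int)) (ls : List Int) :
    absolutedata2stroke3_alt data ls = pvOut data ls (pvEnts ls 0 25 25 data) := by
  unfold absolutedata2stroke3_alt
  rw [foldB1_eq ls data 0 25 25 []]
  have := foldB2_eq data ls (pvEnts ls 0 25 25 data) none []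
  simp only [List.nil_append] at this ⊢
  exact this

-- ===== VERDICT (by name: the statement is the Claim_ definition above) =====
theorem absolutedata2stroke3_spec : Claim_equal_absolutedata2stroke3 := by
  intro data ls _
  unfold Spec_absolutedata2stroke3
  rw [portA_eq_out data ls, portB_eq_out data ls]
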